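-- pv_equiv track=rewrite | github.com/DonaldLucy/gLayout | glade/common/reports.py | summarize_log
-- ===== SOURCE A (Python) =====
-- def summarize_log(text: str) -> list[str]:
--     interesting = []
--     for raw in text.splitlines():
--         line = raw.strip()
--         if not line:
--             continue
--         lowered = line.lower()
--         if any(
--             key in lowered
--             for key in [
--                 "error",
--                 "warning",
--                 "mismatch",
--                 "fail",
--                 "property errors",
--                 "no such",
--                 "could not",
--             ]
--         ):
--             interesting.append(line)
--     return interesting[-30:]
-- ===== SOURCE B (Python) =====
-- def summarize_log(text: str) -> list[str]:
--     keys = ("error", "warning", "mismatch", "fail", "property errors", "no such", "could not")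
--     matches = []
--     for raw in reversed(text.splitlines()):
--         line = raw.strip()
--         if not line:
--             continue
--         lowered = line.lower()
--         if any(key in lowered for key in keys):
--             matches.append(line)
--             if len(matches) == 30:
--                 break
--     return matches[::-1]
-- ===== Notes on version B (the rewrite author's own statement) =====
-- stated objective: alternative
-- what changed: B scans the split lines from the tail with an early break once 30 matches are collected, then reverses, instead of filtering all lines forward and slicing [-30:].
import Mathlib
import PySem

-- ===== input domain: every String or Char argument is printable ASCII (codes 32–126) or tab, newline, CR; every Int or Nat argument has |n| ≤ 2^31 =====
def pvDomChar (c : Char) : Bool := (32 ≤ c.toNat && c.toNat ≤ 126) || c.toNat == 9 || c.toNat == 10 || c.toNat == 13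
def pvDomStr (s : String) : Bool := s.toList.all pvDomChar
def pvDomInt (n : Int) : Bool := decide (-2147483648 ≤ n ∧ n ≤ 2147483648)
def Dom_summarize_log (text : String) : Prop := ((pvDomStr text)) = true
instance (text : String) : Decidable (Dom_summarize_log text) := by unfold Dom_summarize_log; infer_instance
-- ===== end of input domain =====

-- B scans the lines from the tail, stopping once 30 matches are collected, then
-- reverses; A scans everything forward and slices [-30:] (objective: alternative;
-- equal return value proved below).

-- ===== PORT A =====
def pvKeysA : List String :=
  ["error", "warning", "mismatch", "fail", "property errors", "no such", "could not"]

def summarize_log (text : String) : List String :=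
  let interesting := (PySem.Str.splitlines text).foldl (fun acc raw =>
    let line := PySem.Str.strip raw
    if line = "" then acc
    else
      let lowered := PySem.Str.lower line
      if pvKeysA.any (fun key => PySem.Str.isIn key lowered) then acc ++ [line]
      else acc) []
  PySem.List.slice interesting (some (-30)) none

-- ===== PORT B =====
def pvKeysB : List String :=
  ["error", "warning", "mismatch", "fail", "property errors", "no such", "could not"]

-- the for-loop of B over the reversed lines, with its early break at 30 matches
def pvLoopB : List String → List String → List String
  | [], ms => ms
  | raw :: rest, ms =>
    let line := PySem.Str.strip raw
    if line = "" then pvLoopB rest ms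
    else
      let lowered := PySem.Str.lower line
      if pvKeysB.any (fun key => PySem.Str.isIn key lowered) then
        let m := ms ++ [line]
        if m.length = 30 then m else pvLoopB rest m
      else pvLoopB rest ms

def summarize_log_alt (text : String) : List String :=
  (pvLoopB (PySem.Str.splitlines text).reverse []).reverse

-- ===== PRECONDITION & SPEC =====
def Spec_summarize_log (text : String) (out : List String) : Prop := out = summarize_log_alt text
instance (text : String) (out : List String) : Decidable (Spec_summarize_log text out) := by unfold Spec_summarize_log; infer_instance

-- ===== CLAIM (what is proved, stated in full; the proofs are below) =====
def Claim_equal_summarize_log : Prop := ∀ (text : String), Dom_summarize_log text → Spec_summarize_log text (summarize_log text)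

-- ===== LEMMAS AND PROOFS =====

-- the per-line selection both programs perform
def pvKeep (raw : String) : Option String :=
  let line := PySem.Str.strip raw
  if line = "" then none
  else
    let lowered := PySem.Str.lower line
    if pvKeysA.any (fun key => PySem.Str.isIn key lowered) then some line else none

def pvStepA (acc : List String) (raw : String) : List String :=
  if PySem.Str.strip raw = "" then acc
  else if pvKeysA.any (fun key => PySem.Str.isIn key (PySem.Str.lower (PySem.Str.strip raw))) then
    acc ++ [PySem.Str.strip raw]
  else acc

-- A's foldl body is pvStepA up to zeta-reduction of its lets
theorem pvA_eq_step (text : String) :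
    summarize_log text =
      PySem.List.slice ((PySem.Str.splitlines text).foldl pvStepA []) (some (-30)) none := rfl

theorem pvStepA_def (acc : List String) (raw : String) :
    pvStepA acc raw =
      if PySem.Str.strip raw = "" then acc
      else if pvKeysA.any (fun key => PySem.Str.isIn key (PySem.Str.lower (PySem.Str.strip raw))) then
        acc ++ [PySem.Str.strip raw]
      else acc := rfl

theorem pvKeep_def (raw : String) :
    pvKeep raw =
      if PySem.Str.strip raw = "" then none
      else if pvKeysA.any (fun key => PySem.Str.isIn key (PySem.Str.lower (PySem.Str.strip raw))) then
        some (PySem.Str.strip raw)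
      else none := rfl

theorem pvFoldA_eq_filterMap (l : List String) (acc : List String) :
    l.foldl pvStepA acc = acc ++ l.filterMap pvKeep := by
  induction l generalizing acc with
  | nil => simp
  | cons raw rest ih =>
    rw [List.foldl_cons, List.filterMap_cons, pvStepA_def, pvKeep_def]
    split_ifs <;> simp [ih]

theorem pvKeysB_eq : pvKeysB = pvKeysA := rfl

theorem pvLoopB_cons (raw : String) (rest ms : List String) :
    pvLoopB (raw :: rest) ms =
      if PySem.Str.strip raw = "" then pvLoopB rest ms
      else if pvKeysB.any (fun key => PySem.Str.isIn key (PySem.Str.lower (PySem.Str.strip raw))) then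
        (if (ms ++ [PySem.Str.strip raw]).length = 30 then ms ++ [PySem.Str.strip raw]
         else pvLoopB rest (ms ++ [PySem.Str.strip raw]))
      else pvLoopB rest ms := rfl

theorem pvLoopB_eq_take (l : List String) (ms : List String)
    (h : ms.length < 30) :
    pvLoopB l ms = ms ++ (l.filterMap pvKeep).take (30 - ms.length) := by
  induction l generalizing ms with
  | nil => simp [pvLoopB]
  | cons raw rest ih =>
    rw [pvLoopB_cons, List.filterMap_cons, pvKeep_def, pvKeysB_eq]
    split_ifs with h1 h2 h3
    · simpa using ih ms h
    · have h30 : 30 - ms.length = 1 := by simp at h3; omega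
      simp [h30]
    · have hlen : (ms ++ [PySem.Str.strip raw]).length < 30 := by simp at h3 ⊢; omega
      rw [ih _ hlen]
      have h30 : 30 - ms.length = (30 - (ms ++ [PySem.Str.strip raw]).length) + 1 := by
        simp; omega
      simp [h30]
    · simpa using ih ms h

theorem pvPorts_eq (text : String) : summarize_log text = summarize_log_alt text := by
  rw [pvA_eq_step]
  unfold summarize_log_alt
  rw [pvFoldA_eq_filterMap, pvLoopB_eq_take _ _ (by simp)]
  simp only [List.nil_append, List.filterMap_reverse, List.take_reverse,
    List.reverse_reverse]
  rw [PySem.List.slice_some_none]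
  have h30 : (-30 : Int) = -((30 : Nat) : Int) := by norm_num
  rw [h30, PySem.List.clampIdx_neg_natCast _ _ (by norm_num)]
  simp

-- ===== VERDICT (by name: the statement is the Claim_ definition above) =====
theorem summarize_log_spec : Claim_equal_summarize_log := by
  intro text _
  exact pvPorts_eq text
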